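-- pv_equiv track=rewrite | github.com/tberhanu/all_trainings | 9_training/str_without_3A3B.py | foo
-- ===== SOURCE A (Python) =====
-- def foo(A, B, big, small):
--     a = list(big * A)
--     i = 2
--     j = 0
--     while i < A + B and j < B:
--         a.insert(i, small)
--         i = i + 3
--         j = j + 1
--
--     return "".join(a)
-- ===== SOURCE B (Python) =====
-- def foo(A, B, big, small):
--     s = big * A
--     t = A + B
--     k = max(0, min(B, t // 3))
--     return "".join(s[2 * j:2 * j + 2] + small for j in range(k)) + s[2 * k:]
-- ===== Notes on version B (the rewrite author's own statement) =====
-- stated objective: faster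
-- what changed: B replaces A's while-loop of repeated list.insert into a growing list by a closed-form count k = max(0, min(B, (A+B)//3)) of inserted 'small's and builds the result directly from two-character slices of big*A joined with small, plus the tail slice.
import Mathlib
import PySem

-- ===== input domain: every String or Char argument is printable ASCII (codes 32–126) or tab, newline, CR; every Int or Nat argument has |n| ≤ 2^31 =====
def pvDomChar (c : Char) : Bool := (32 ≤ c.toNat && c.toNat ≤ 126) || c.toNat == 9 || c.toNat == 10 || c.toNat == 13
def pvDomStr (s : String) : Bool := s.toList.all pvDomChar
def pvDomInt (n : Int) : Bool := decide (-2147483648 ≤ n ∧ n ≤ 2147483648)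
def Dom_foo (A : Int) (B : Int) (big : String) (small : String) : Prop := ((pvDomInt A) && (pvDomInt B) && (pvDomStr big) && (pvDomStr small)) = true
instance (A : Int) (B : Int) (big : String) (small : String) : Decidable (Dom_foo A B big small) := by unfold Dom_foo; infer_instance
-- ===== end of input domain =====

-- B replaces A's repeated list.insert loop by one closed-form count of the inserted 'small's
-- plus direct slice concatenation (objective: faster — no quadratic middle-insertion).

-- ===== PORT A =====
-- exact port of Python's  str * int  (the empty-source case returns [] directly instead of
-- materialising replicate n []; same value, evaluable for huge n)
def pvStrMul (cs : List Char) (n : Int) : List Char :=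
  if cs = [] then [] else PySem.List.pyRepeat cs n

-- the while loop: a is the Python list of strings (each element kept as its code points);
-- list.insert clamps the position exactly as PySem.List.insert does
def fooLoop (t B : Int) (small : List Char) (a : List (List Char)) (i j : Int) :
    List (List Char) :=
  if i < t ∧ j < B then
    fooLoop t B small (PySem.List.insert a i small) (i + 3) (j + 1)
  else a
termination_by (B - j).toNat
decreasing_by omega

def foo (A : Int) (B : Int) (big : String) (small : String) : String :=
  -- a = list(big * A): the 1-character strings of big * A
  let a := (pvStrMul big.toList A).map (fun c => [c])
  -- "".join(a): join with the empty separator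
  String.ofList (PySem.Chars.join [] (fooLoop (A + B) B small.toList a 2 0))

-- ===== PORT B =====
def foo_alt (A : Int) (B : Int) (big : String) (small : String) : String :=
  let s := pvStrMul big.toList A
  let t := A + B
  let k := max 0 (min B (PySem.Int.floordiv t 3))
  -- "".join(s[2*j:2*j+2] + small for j in range(k)) + s[2*k:]
  String.ofList
    ((PySem.List.pyRange 0 k 1).foldl
        (fun acc j =>
          acc ++ PySem.List.slice s (some (2 * j)) (some (2 * j + 2)) ++ small.toList) []
      ++ PySem.List.slice s (some (2 * k)) none)

-- ===== PRECONDITION & SPEC =====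
def Spec_foo (A : Int) (B : Int) (big : String) (small : String) (out : String) : Prop := out = foo_alt A B big small
instance (A : Int) (B : Int) (big : String) (small : String) (out : String) : Decidable (Spec_foo A B big small out) := by unfold Spec_foo; infer_instance

-- ===== CLAIM (what is proved, stated in full; the proofs are below) =====
def Claim_equal_foo : Prop := ∀ (A : Int) (B : Int) (big : String) (small : String), Dom_foo A B big small → Spec_foo A B big small (foo A B big small)

-- ===== LEMMAS AND PROOFS =====

-- Python list.insert at a nonnegative position is take ++ element ++ drop (clamped).
theorem pvIns_eq {α : Type} (xs : List α) (i : Int) (v : α) (h : 0 ≤ i) :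
    PySem.List.insert xs i v = xs.take i.toNat ++ v :: xs.drop i.toNat := by
  simp only [PySem.List.insert, PySem.List.sliceIndices]
  norm_num [not_lt.mpr h]
  rw [show (min i (xs.length:Int)).toNat = min i.toNat xs.length by omega]
  rcases le_total i.toNat xs.length with hle | hle
  · rw [min_eq_left hle]
  · rw [min_eq_right hle]
    simp [List.take_of_length_le hle, List.drop_eq_nil_of_le hle]

theorem pvFlattenSingl (cs : List Char) : (cs.map (fun c => [c])).flatten = cs := by
  induction cs with
  | nil => rfl
  | cons c tl ih => simp [ih]

-- Shape of the loop state: the already-fixed prefix, the untouched singleton characters,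
-- the next relative insertion position r, and the absolute counters i, j of A's loop.
def pvFF (t B : Int) (m : List Char) (cs : List Char) (r i j : Int) : List (List Char) :=
  if i < t ∧ j < B then
    (cs.take r.toNat).map (fun c => [c]) ++ [m] ++
      pvFF t B m (cs.drop r.toNat) (r + 2 - min r cs.length) (i + 3) (j + 1)
  else cs.map (fun c => [c])
termination_by (B - j).toNat
decreasing_by omega

theorem pvLoop_eq (t B : Int) (m : List Char) :
    ∀ (fuel : Nat) (pre : List (List Char)) (cs : List Char) (i j : Int),
      (B - j).toNat ≤ fuel → (pre.length : Int) ≤ i →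
      fooLoop t B m (pre ++ cs.map (fun c => [c])) i j
        = pre ++ pvFF t B m cs (i - pre.length) i j := by
  intro fuel
  induction fuel with
  | zero =>
    intro pre cs i j hf hp
    rw [fooLoop, pvFF, if_neg (by omega), if_neg (by omega)]
  | succ n ih =>
    intro pre cs i j hf hp
    have h0 : 0 ≤ i := le_trans (by positivity) hp
    by_cases hg : i < t ∧ j < B
    · rw [fooLoop, if_pos hg, pvFF, if_pos hg]
      rw [pvIns_eq _ _ _ h0]
      have hplen : pre.length ≤ i.toNat := by omega
      rw [List.take_append, List.drop_append]
      rw [List.take_of_length_le hplen, List.drop_eq_nil_of_le hplen, List.nil_append]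
      rw [← List.map_take, ← List.map_drop]
      set d : Nat := i.toNat - pre.length with hd
      have hmain := ih (pre ++ (cs.take d).map (fun c => [c]) ++ [m]) (cs.drop d)
        (i + 3) (j + 1) (by omega) (by
          simp only [List.length_append, List.length_map, List.length_take,
            List.length_cons, List.length_nil]
          push_cast; omega)
      rw [show pre ++ (cs.take d).map (fun c => [c]) ++ m :: (cs.drop d).map (fun c => [c])
            = (pre ++ (cs.take d).map (fun c => [c]) ++ [m]) ++ (cs.drop d).map (fun c => [c]) by
          simp]
      rw [hmain]
      have hr : (i - (pre.length : Int)).toNat = d := by omega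
      have harg : i + 3 - ((pre ++ (cs.take d).map (fun c => [c]) ++ [m]).length : Int)
          = (i - pre.length) + 2 - min (i - pre.length) (cs.length : Int) := by
        simp only [List.length_append, List.length_map, List.length_take,
          List.length_cons, List.length_nil]
        push_cast; omega
      rw [harg, hr]
      simp
    · rw [fooLoop, if_neg hg, pvFF, if_neg hg]

-- closed form: k pieces of two characters, each followed by small, then the rest
def pvG (m : List Char) : Nat → List Char → List Char
  | 0, cs => cs
  | k+1, cs => cs.take 2 ++ m ++ pvG m k (cs.drop 2)

-- iterations left from counters (i, j)
def pvCnt (t B i j : Int) : Nat := (min (B - j) ((t - i + 2) / 3)).toNat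

theorem pvFF_flatten (t B : Int) (m : List Char) :
    ∀ (fuel : Nat) (cs : List Char) (r i j : Int),
      (B - j).toNat ≤ fuel → 2 ≤ r → (2 < r → cs = []) →
      (pvFF t B m cs r i j).flatten = pvG m (pvCnt t B i j) cs := by
  intro fuel
  induction fuel with
  | zero =>
    intro cs r i j hf hr hcs
    rw [pvFF, if_neg (by omega)]
    rw [show pvCnt t B i j = 0 by unfold pvCnt; omega]
    exact pvFlattenSingl cs
  | succ n ih =>
    intro cs r i j hf hr hcs
    by_cases hg : i < t ∧ j < B
    · rw [pvFF, if_pos hg]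
      have hcnt : pvCnt t B i j = pvCnt t B (i + 3) (j + 1) + 1 := by
        unfold pvCnt; omega
      rw [hcnt, pvG]
      have htake : cs.take r.toNat = cs.take 2 := by
        rcases eq_or_lt_of_le hr with h2 | h2
        · rw [← h2]; rfl
        · rw [hcs h2]; simp
      have hdrop : cs.drop r.toNat = cs.drop 2 := by
        rcases eq_or_lt_of_le hr with h2 | h2
        · rw [← h2]; rfl
        · rw [hcs h2]; simp
      have hih := ih (cs.drop r.toNat) (r + 2 - min r (cs.length : Int)) (i + 3) (j + 1)
        (by omega) (by omega) (by
          intro hgt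
          have : (cs.length : Int) < r := by omega
          exact List.drop_eq_nil_of_le (by omega))
      simp only [List.flatten_append, List.flatten_cons, List.flatten_nil]
      rw [hih, htake, hdrop]
      simp
      rw [← List.map_take, pvFlattenSingl]
    · rw [pvFF, if_neg hg]
      rw [show pvCnt t B i j = 0 by unfold pvCnt; omega]
      exact pvFlattenSingl cs

theorem pvG_eq (m : List Char) : ∀ (k : Nat) (cs : List Char),
    pvG m k cs
      = (List.range k).flatMap (fun j => (cs.drop (2 * j)).take 2 ++ m) ++ cs.drop (2 * k) := by
  intro k
  induction k with
  | zero => intro cs; simp [pvG]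
  | succ n ih =>
    intro cs
    rw [pvG, List.range_succ_eq_map, List.flatMap_cons, List.flatMap_map]
    rw [ih (cs.drop 2)]
    simp only [List.drop_drop, List.drop_zero, Nat.mul_zero]
    rw [show 2 + 2 * n = 2 * (n + 1) by ring]
    simp only [List.append_assoc]
    congr 2
    congr 1
    apply List.flatMap_congr
    intro j _
    rw [show 2 + 2 * j = 2 * j.succ by omega]

theorem pvJoinNil (l : List (List Char)) : PySem.Chars.join [] l = l.flatten := by
  simp only [PySem.Chars.join, List.intercalate]
  induction l with
  | nil => rfl
  | cons h t ih => cases t <;> simp_all [List.intersperse]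

theorem pvPyRangeZero (k : Int) :
    PySem.List.pyRange 0 k 1 = (List.range k.toNat).map Int.ofNat := by
  simp only [PySem.List.pyRange]
  norm_num
  split_ifs with h
  · apply List.map_congr_left
    intro a _
    simp [Int.ofNat_eq_natCast]
  · rw [show k.toNat = 0 by omega]; rfl

theorem pvFlatMapMap {α β γ : Type} (f : β → List γ) (g : α → β) (l : List α) :
    (l.map g).flatMap f = l.flatMap (fun x => f (g x)) := by
  induction l with
  | nil => rfl
  | cons a tl ih => simp [ih]

theorem pvSlice2 (s : List Char) (n : Nat) :
    PySem.List.slice s (some (2 * Int.ofNat n)) (some (2 * Int.ofNat n + 2))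
      = (s.drop (2 * n)).take 2 := by
  have h2 : (2 * Int.ofNat n + 2) = (((2 * n + 2 : Nat)) : Int) := by
    simp [Int.ofNat_eq_natCast]
  have h1 : (2 * Int.ofNat n) = ((2 * n : Nat) : Int) := by
    simp [Int.ofNat_eq_natCast]
  rw [h2, h1, PySem.List.slice_natCast]
  congr 1
  omega

theorem pvBridge (s m : List Char) (kk : Nat) :
    List.flatMap (fun j : Int => PySem.List.slice s (some (2*j)) (some (2*j+2)) ++ m)
        ((List.range kk).map Int.ofNat)
      = List.flatMap (fun n : Nat => (s.drop (2*n)).take 2 ++ m) (List.range kk) := by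
  rw [pvFlatMapMap]
  apply List.flatMap_congr
  intro n _
  rw [pvSlice2]

theorem pvMain (A B : Int) (big small : String) : foo A B big small = foo_alt A B big small := by
  simp only [foo, foo_alt]
  rw [PySem.Int.floordiv_eq_ediv_of_pos (by norm_num : (0:Int) < 3)]
  set s := pvStrMul big.toList A with hs
  set m := small.toList with hm
  set t := A + B with ht
  set k := max 0 (min B (t / 3)) with hk
  have hk0 : 0 ≤ k := by omega
  -- A's loop, then its flattening
  have hA := pvLoop_eq t B m (B - 0).toNat [] s 2 0 (le_refl _) (by simp)
  norm_num at hA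
  rw [pvJoinNil, hA]
  rw [pvFF_flatten t B m (B - 0).toNat s 2 2 0 (le_refl _) (le_refl _)
    (by intro h; omega)]
  -- B's closed form
  rw [pvPyRangeZero]
  simp only [List.append_assoc]
  rw [PySem.List.foldl_append_eq_flatMap]
  rw [pvBridge s m k.toNat]
  rw [PySem.List.slice_from s (show (0:Int) ≤ 2 * k by omega)]
  rw [show (2 * k).toNat = 2 * k.toNat by omega]
  simp only [List.nil_append]
  rw [← pvG_eq m k.toNat s]
  rw [show pvCnt t B 2 0 = k.toNat by unfold pvCnt; omega]

-- ===== VERDICT (by name: the statement is the Claim_ definition above) =====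
theorem foo_spec : Claim_equal_foo := by
  intro A B big small _
  exact pvMain A B big small
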